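-- pv_equiv track=rewrite | github.com/Yoonkyo/MAFT-Plus | demo/framework.py | UQ
-- ===== SOURCE A (Python) =====
-- def UQ(y):
--     x = y.copy()
--     rate = {0:0, 1:12, 2:24, 3:48, 4:196}
--     for i in range(len(x)):
--         if x[i]>rate[3]:
--             x[i] = rate[4]
--         elif x[i]>rate[2]:
--             x[i] = rate[3]
--         elif x[i]>rate[1]:
--             x[i] = rate[2]
--         elif x[i]>rate[0]:
--             x[i] = rate[1]
--         else:
--             x[i] = rate[0]
--     return x
-- ===== SOURCE B (Python) =====
-- def UQ(y):
--     thresholds = [0, 12, 24, 48]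
--     outputs = [0, 12, 24, 48, 196]
--     x = y.copy()
--     for i in range(len(x)):
--         x[i] = outputs[sum(x[i] > t for t in thresholds)]
--     return x
-- ===== Notes on version B (the rewrite author's own statement) =====
-- stated objective: idiomatic
-- what changed: Replaces the top-down elif comparison chain with a sorted threshold table and a count-of-thresholds-exceeded lookup into an output table.
import Mathlib
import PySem

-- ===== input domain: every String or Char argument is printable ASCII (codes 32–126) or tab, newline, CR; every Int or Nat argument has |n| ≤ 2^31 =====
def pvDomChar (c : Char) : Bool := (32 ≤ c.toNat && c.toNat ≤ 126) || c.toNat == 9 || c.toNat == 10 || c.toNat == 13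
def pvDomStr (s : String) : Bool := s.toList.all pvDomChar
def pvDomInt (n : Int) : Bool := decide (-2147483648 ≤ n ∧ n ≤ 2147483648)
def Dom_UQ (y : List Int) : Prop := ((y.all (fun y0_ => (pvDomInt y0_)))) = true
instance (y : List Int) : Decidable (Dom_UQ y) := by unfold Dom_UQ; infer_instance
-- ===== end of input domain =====

-- B replaces A's elif comparison chain with a threshold/output table lookup (objective: idiomatic).

-- ===== PORT A =====
-- copy + index loop: for i in range(len(x)): elif chain over rate[k]
def UQ (y : List Int) : List Int :=
  (PySem.List.pyRange 0 (y.length : Int) 1).foldl (fun x i =>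
    match PySem.List.pyGet? x i with
    | some v =>
        x.set i.toNat
          (if v > 48 then 196
           else if v > 24 then 48
           else if v > 12 then 24
           else if v > 0 then 12
           else 0)
    | none => x) y

-- ===== PORT B =====
-- copy + index loop: x[i] = outputs[sum(x[i] > t for t in thresholds)]
def UQ_alt (y : List Int) : List Int :=
  let thresholds : List Int := [0, 12, 24, 48]
  let outputs : List Int := [0, 12, 24, 48, 196]
  (PySem.List.pyRange 0 (y.length : Int) 1).foldl (fun x i =>
    match PySem.List.pyGet? x i with
    | some v =>
        match PySem.List.pyGet?
            outputs (thresholds.foldl (fun acc t => acc + (if v > t then 1 else 0)) 0) with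
        | some o => x.set i.toNat o
        | none => x
    | none => x) y

-- ===== PRECONDITION & SPEC =====
def Spec_UQ (y : List Int) (out : List Int) : Prop := out = UQ_alt y
instance (y : List Int) (out : List Int) : Decidable (Spec_UQ y out) := by unfold Spec_UQ; infer_instance

-- ===== CLAIM (what is proved, stated in full; the proofs are below) =====
def Claim_equal_UQ : Prop := ∀ (y : List Int), Dom_UQ y → Spec_UQ y (UQ y)

-- ===== LEMMAS AND PROOFS =====

-- For every element value v, B's table lookup returns exactly A's elif-chain value.
theorem UQ_table_lookup (v : Int) :
    PySem.List.pyGet? ([0, 12, 24, 48, 196] : List Int)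
      (([0, 12, 24, 48] : List Int).foldl (fun acc t => acc + (if v > t then 1 else 0)) 0)
    = some (if v > 48 then 196
            else if v > 24 then 48
            else if v > 12 then 24
            else if v > 0 then 12
            else 0) := by
  simp only [List.foldl]
  split_ifs <;> first
    | omega
    | decide

-- The two per-index loop bodies are the same function.
theorem UQ_body_eq :
    (fun (x : List Int) (i : Int) =>
      match PySem.List.pyGet? x i with
      | some v =>
          match PySem.List.pyGet?
              ([0, 12, 24, 48, 196] : List Int)
              (([0, 12, 24, 48] : List Int).foldl (fun acc t => acc + (if v > t then 1 else 0)) 0) with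
          | some o => x.set i.toNat o
          | none => x
      | none => x)
    = (fun (x : List Int) (i : Int) =>
      match PySem.List.pyGet? x i with
      | some v =>
          x.set i.toNat
            (if v > 48 then 196
             else if v > 24 then 48
             else if v > 12 then 24
             else if v > 0 then 12
             else 0)
      | none => x) := by
  funext x i
  cases h : PySem.List.pyGet? x i with
  | none => simp
  | some v => simp only [UQ_table_lookup v]

-- ===== VERDICT (by name: the statement is the Claim_ definition above) =====
theorem UQ_spec : Claim_equal_UQ := by
  intro y _
  simp only [Spec_UQ, UQ, UQ_alt]
  rw [UQ_body_eq]
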